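-- pv_equiv track=rewrite | github.com/mitchellgordon95/text_degeneration | src/metrics/repetition.py | count_repeated_ngrams
-- ===== SOURCE A (Python) =====
-- from typing import List, Tuple, Dict
-- from collections import Counter
--
-- def count_repeated_ngrams(text: str, n_values: List[int] = [1, 2, 3, 4]) -> Dict[int, int]:
--     """
--     Count repeated n-grams for multiple n values.
--
--     Args:
--         text: Single text to analyze
--         n_values: List of n-gram sizes to check
--
--     Returns:
--         Dictionary mapping n to number of repeated n-grams
--     """
--     results = {}
--
--     for n in n_values:
--         ngrams = _get_ngrams(text, n)
--         counter = Counter(ngrams)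
--         # Count ngrams that appear more than once
--         repeated = sum(1 for count in counter.values() if count > 1)
--         results[n] = repeated
--
--     return results
--
-- def _get_ngrams(text: str, n: int, exclude_punctuation: bool = False) -> List[Tuple[str, ...]]:
--     """
--     Extract n-grams from text.
--
--     Args:
--         text: Input text
--         n: N-gram size
--         exclude_punctuation: Whether to exclude punctuation-only ngrams
--
--     Returns:
--         List of n-gram tuples
--     """
--     # Tokenize (simple whitespace tokenization)
--     tokens = text.split()
--
--     if len(tokens) < n:
--         return []
--
--     ngrams = []
--     for i in range(len(tokens) - n + 1):
--         ngram = tuple(tokens[i:i + n])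
--
--         # Optionally exclude punctuation-only ngrams
--         if exclude_punctuation:
--             # Check if all tokens are punctuation
--             if all(_is_punctuation(token) for token in ngram):
--                 continue
--
--         ngrams.append(ngram)
--
--     return ngrams
--
-- def _is_punctuation(token: str) -> bool:
--     """Check if a token is only punctuation."""
--     import string
--     return all(c in string.punctuation for c in token)
-- ===== SOURCE B (Python) =====
-- def count_repeated_ngrams(text, n_values=[1, 2, 3, 4]):
--     """Sort each n-gram list, then count runs of equal adjacent n-grams longer than 1."""
--     tokens = text.split()
--     results = {}
--     for n in n_values:
--         grams = sorted(tuple(tokens[i:i + n]) for i in range(len(tokens) - n + 1))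
--         repeated = 0
--         i = 0
--         m = len(grams)
--         while i < m:
--             j = i + 1
--             while j < m and grams[j] == grams[i]:
--                 j += 1
--             if j - i > 1:
--                 repeated += 1
--             i = j
--         results[n] = repeated
--     return results
-- ===== Notes on version B (the rewrite author's own statement) =====
-- stated objective: alternative
-- what changed: Replaces the hash-counting phase (Counter per n, then count values > 1) by a sort-then-scan algorithm: the n-gram list is sorted and one grouping pass counts maximal runs of equal adjacent n-grams of length > 1.
import Mathlib
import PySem

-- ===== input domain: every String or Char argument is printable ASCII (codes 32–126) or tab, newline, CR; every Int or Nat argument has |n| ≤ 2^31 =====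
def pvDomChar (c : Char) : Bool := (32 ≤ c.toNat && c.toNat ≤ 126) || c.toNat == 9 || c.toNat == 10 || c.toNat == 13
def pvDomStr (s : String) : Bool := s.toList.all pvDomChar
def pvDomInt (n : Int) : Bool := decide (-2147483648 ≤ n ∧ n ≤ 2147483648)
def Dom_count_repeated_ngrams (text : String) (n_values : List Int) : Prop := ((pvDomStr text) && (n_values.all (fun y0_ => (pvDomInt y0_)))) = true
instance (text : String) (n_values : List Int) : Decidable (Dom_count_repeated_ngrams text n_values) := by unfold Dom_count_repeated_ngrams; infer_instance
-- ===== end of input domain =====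

-- B replaces A's Counter-then-count-values>1 phase per n by sort-then-scan:
-- sort the n-gram list and count maximal runs of equal adjacent n-grams of length > 1
-- in one grouping pass; same tokenization and n-gram slicing, no speed claim.

-- the order the ports sort List String by: Python's tuple-of-str comparison = lexicographic
@[reducible] def pvLO : LinearOrder (List String) := inferInstance

-- Boolean ≤ on grams, Python's tuple-of-str comparison
def pvLeGram (a b : List String) : Bool := @decide (a ≤ b) (pvLO.toDecidableLE a b)

-- ===== PORT A =====
-- string.punctuation
def pvPunctuation : List Char :=
  ['!', '"', '#', '$', '%', '&', '\'', '(', ')', '*', '+', ',', '-', '.', '/',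
   ':', ';', '<', '=', '>', '?', '@', '[', '\\', ']', '^', '_', '`', '{', '|', '}', '~']

def pv_is_punctuation (token : String) : Bool :=
  token.toList.all (fun c => pvPunctuation.contains c)

def pv_get_ngrams (text : String) (n : Int) (exclude_punctuation : Bool) : List (List String) :=
  let tokens := PySem.Str.split₀ text
  if (tokens.length : Int) < n then []
  else
    (PySem.List.pyRange 0 ((tokens.length : Int) - n + 1) 1).foldl
      (fun ngrams i =>
        let ngram := PySem.List.slice tokens (some i) (some (i + n))
        if exclude_punctuation && ngram.all (fun t => pv_is_punctuation t) then ngrams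
        else ngrams ++ [ngram])
      []

def count_repeated_ngrams (text : String) (n_values : List Int) : List (Int × Int) :=
  (n_values.foldl
    (fun results n =>
      let ngrams := pv_get_ngrams text n false
      let counter := PySem.Dict.counter ngrams
      let repeated := counter.values.foldl (fun acc c => if c > 1 then acc + 1 else acc) 0
      results.insert n repeated)
    PySem.Dict.empty).items

-- ===== PORT B =====
-- Source B's outer while loop over the sorted gram list (index i jumping to the end j of the
-- current run) transcribed as the obvious recursion on the remaining suffix: the inner
-- `while j < m and grams[j] == grams[i]` scan is the takeWhile-length of the run.
def pvCountRuns : List (List String) → Int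
  | [] => 0
  | g :: rest =>
      let run := (rest.takeWhile (fun y => y == g)).length
      (if run + 1 > 1 then 1 else 0) + pvCountRuns (rest.drop run)
termination_by l => l.length
decreasing_by simp [List.length_drop]

def count_repeated_ngrams_alt (text : String) (n_values : List Int) : List (Int × Int) :=
  let tokens := PySem.Str.split₀ text
  (n_values.foldl
    (fun results n =>
      let grams :=
        ((PySem.List.pyRange 0 ((tokens.length : Int) - n + 1) 1).map
            (fun i => PySem.List.slice tokens (some i) (some (i + n)))).mergeSort pvLeGram
      results.insert n (pvCountRuns grams))
    PySem.Dict.empty).items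

-- ===== PRECONDITION & SPEC =====
def Spec_count_repeated_ngrams (text : String) (n_values : List Int) (out : List (Int × Int)) : Prop := out = count_repeated_ngrams_alt text n_values
instance (text : String) (n_values : List Int) (out : List (Int × Int)) : Decidable (Spec_count_repeated_ngrams text n_values out) := by unfold Spec_count_repeated_ngrams; infer_instance

-- ===== CLAIM (what is proved, stated in full; the proofs are below) =====
def Claim_equal_count_repeated_ngrams : Prop := ∀ (text : String) (n_values : List Int), Dom_count_repeated_ngrams text n_values → Spec_count_repeated_ngrams text n_values (count_repeated_ngrams text n_values)

-- ===== LEMMAS AND PROOFS =====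

-- two nodup lists with the same members have filters of the same length
lemma pv_filter_len_congr (e₁ e₂ : List (List String)) (p : List String → Bool)
    (h₁ : e₁.Nodup) (h₂ : e₂.Nodup) (hm : ∀ x, x ∈ e₁ ↔ x ∈ e₂) :
    (e₁.filter p).length = (e₂.filter p).length := by
  have hperm : e₁.Perm e₂ := (List.perm_ext_iff_of_nodup h₁ h₂).mpr hm
  exact (hperm.filter p).length_eq

-- the run scan over a ≤-sorted list counts the distinct elements occurring at least twice
lemma pv_countRuns_sorted_aux (N : Nat) : ∀ (ys : List (List String)), ys.length ≤ N →
    ys.Pairwise (· ≤ ·) →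
    pvCountRuns ys
      = (((PySem.Set.ofList ys).filter (fun g => decide (2 ≤ ys.count g))).length : Int) := by
  induction N with
  | zero =>
    intro ys hlen _
    have hnil : ys = [] := List.eq_nil_of_length_eq_zero (Nat.le_zero.mp hlen)
    subst hnil
    simp [pvCountRuns, PySem.Set.ofList]
  | succ N ih =>
    intro ys hlen hs
    match ys with
    | [] => simp [pvCountRuns, PySem.Set.ofList]
    | g :: rest =>
      have hsplit : rest.takeWhile (fun y => y == g) ++ rest.dropWhile (fun y => y == g) = rest :=
        List.takeWhile_append_dropWhile
      have hdrop : rest.drop (rest.takeWhile (fun y => y == g)).length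
          = rest.dropWhile (fun y => y == g) := by
        have h := @List.drop_left (List String) (rest.takeWhile (fun y => y == g))
          (rest.dropWhile (fun y => y == g))
        rw [hsplit] at h
        exact h
      have htall : ∀ x ∈ rest.takeWhile (fun y => y == g), x = g := by
        intro x hx
        have := List.mem_takeWhile_imp hx
        simpa using this
      have hrestpw : rest.Pairwise (· ≤ ·) := List.Pairwise.of_cons hs
      have hge : ∀ y ∈ rest, g ≤ y := (List.pairwise_cons.mp hs).1
      have hgd : g ∉ rest.dropWhile (fun y => y == g) := by
        cases hD : rest.dropWhile (fun y => y == g) with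
        | nil => simp
        | cons x d' =>
          have hpx : ¬ ((x == g) = true) := by
            have hh : (rest.dropWhile (fun y => y == g)).head? = some x := by rw [hD]; rfl
            have := List.head?_dropWhile_not (p := fun y => y == g) (l := rest)
            rw [hh] at this
            simpa using this
          have hxg : x ≠ g := by simpa using hpx
          have hsub : List.Sublist (x :: d') rest := hD ▸ List.dropWhile_sublist _
          have hx_rest : x ∈ rest := hsub.subset (by simp)
          have hgx : g < x := lt_of_le_of_ne (hge x hx_rest) (Ne.symm hxg)
          have hpwd : (x :: d').Pairwise (· ≤ ·) := hrestpw.sublist hsub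
          intro hmem
          rcases List.mem_cons.mp hmem with h | h
          · exact hxg h.symm
          · have hxle : x ≤ g := (List.pairwise_cons.mp hpwd).1 g h
            exact absurd (lt_of_lt_of_le hgx hxle) (lt_irrefl g)
      have hct : (rest.takeWhile (fun y => y == g)).count g
          = (rest.takeWhile (fun y => y == g)).length :=
        List.count_eq_length.mpr (fun b hb => (htall b hb).symm)
      have hcd : (rest.dropWhile (fun y => y == g)).count g = 0 := List.count_eq_zero.mpr hgd
      have hcrest : rest.count g = (rest.takeWhile (fun y => y == g)).length := by
        conv_lhs => rw [← hsplit]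
        rw [List.count_append, hct, hcd]
        omega
      have hcg : (g :: rest).count g = (rest.takeWhile (fun y => y == g)).length + 1 := by
        rw [List.count_cons_self, hcrest]
      have hDlen : (rest.dropWhile (fun y => y == g)).length ≤ N := by
        have h1 : (rest.dropWhile (fun y => y == g)).length ≤ rest.length :=
          (List.dropWhile_sublist _).length_le
        have h2 : rest.length ≤ N := by
          have := hlen
          simp only [List.length_cons] at this
          omega
        omega
      have hIH := ih (rest.dropWhile (fun y => y == g)) hDlen
        (hrestpw.sublist (List.dropWhile_sublist _))
      -- nodup enumeration g :: ofList (dropWhile …) of the members of g :: rest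
      have hgnotof : g ∉ PySem.Set.ofList (rest.dropWhile (fun y => y == g)) := by
        rw [PySem.Set.mem_ofList]
        exact hgd
      have hnodup_e : (g :: PySem.Set.ofList (rest.dropWhile (fun y => y == g))).Nodup :=
        List.nodup_cons.mpr ⟨hgnotof, PySem.Set.nodup_ofList _⟩
      have hmem_e : ∀ x, x ∈ (g :: PySem.Set.ofList (rest.dropWhile (fun y => y == g)))
          ↔ x ∈ PySem.Set.ofList (g :: rest) := by
        intro x
        rw [PySem.Set.mem_ofList, List.mem_cons, PySem.Set.mem_ofList, List.mem_cons]
        constructor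
        · rintro (h | h)
          · exact Or.inl h
          · exact Or.inr ((hsplit ▸ List.mem_append_right _ h))
        · rintro (h | h)
          · exact Or.inl h
          · rw [← hsplit] at h
            rcases List.mem_append.mp h with h | h
            · exact Or.inl (htall x h)
            · exact Or.inr h
      have hswap : (((PySem.Set.ofList (g :: rest)).filter
            (fun x => decide (2 ≤ (g :: rest).count x))).length)
          = (((g :: PySem.Set.ofList (rest.dropWhile (fun y => y == g))).filter
            (fun x => decide (2 ≤ (g :: rest).count x))).length) :=
        pv_filter_len_congr _ _ _ (PySem.Set.nodup_ofList _) hnodup_e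
          (fun x => (hmem_e x).symm)
      -- counts of the non-g elements drop to counts in the dropWhile suffix
      have htail : ((PySem.Set.ofList (rest.dropWhile (fun y => y == g))).filter
            (fun x => decide (2 ≤ (g :: rest).count x)))
          = ((PySem.Set.ofList (rest.dropWhile (fun y => y == g))).filter
            (fun x => decide (2 ≤ (rest.dropWhile (fun y => y == g)).count x))) := by
        apply List.filter_congr
        intro x hx
        rw [PySem.Set.mem_ofList] at hx
        have hxg : x ≠ g := fun h => hgd (h ▸ hx)
        have hxt : x ∉ rest.takeWhile (fun y => y == g) := fun h => hxg (htall x h)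
        have hcx : rest.count x = (rest.dropWhile (fun y => y == g)).count x := by
          conv_lhs => rw [← hsplit]
          rw [List.count_append, List.count_eq_zero.mpr hxt]
          omega
        have : (g :: rest).count x = (rest.dropWhile (fun y => y == g)).count x := by
          rw [List.count_cons_of_ne (fun h => hxg h.symm), hcx]
        rw [this]
      rw [pvCountRuns, hdrop, hIH, hswap, List.filter_cons, htail]
      by_cases hrun : 0 < (rest.takeWhile (fun y => y == g)).length
      · have hp : decide (2 ≤ (g :: rest).count g) = true := by
          rw [hcg]; simpa using by omega
        rw [hp]
        simp only [if_pos (by omega :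
          (rest.takeWhile (fun y => y == g)).length + 1 > 1)]
        rw [if_pos trivial, List.length_cons]
        push_cast
        ring
      · have hrun0 : (rest.takeWhile (fun y => y == g)).length = 0 := by omega
        have hp : decide (2 ≤ (g :: rest).count g) = false := by
          rw [hcg, hrun0]; simp
        rw [hp]
        simp only [if_neg (by omega : ¬ ((rest.takeWhile (fun y => y == g)).length + 1 > 1))]
        push_cast
        ring

lemma pv_countRuns_sorted (ys : List (List String)) (hs : ys.Pairwise (· ≤ ·)) :
    pvCountRuns ys
      = (((PySem.Set.ofList ys).filter (fun g => decide (2 ≤ ys.count g))).length : Int) :=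
  pv_countRuns_sorted_aux ys.length ys le_rfl hs

-- A's Counter-then-count-values>1 phase equals the distinct-with-count≥2 cardinality
lemma pv_counter_eq_filter (xs : List (List String)) :
    (PySem.Dict.counter xs).values.foldl (fun acc c => if c > 1 then acc + 1 else acc) 0
      = (((PySem.Set.ofList xs).filter (fun k => decide (2 ≤ xs.count k))).length : Int) := by
  have hvals : (PySem.Dict.counter xs).values
      = (PySem.Set.ofList xs).map (fun k => (xs.count k : Int)) := by
    show ((PySem.Dict.counter xs).items.map Prod.snd) = _
    rw [PySem.Dict.items_counter]
    simp [List.map_map, Function.comp]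
  rw [hvals]
  simp only [show ∀ (c acc : Int), (if c > 1 then acc + 1 else acc)
    = (if decide (c > 1) = true then acc + 1 else acc) from fun c acc => by simp]
  rw [PySem.List.foldl_count_if]
  rw [← List.countP_eq_length_filter]
  have hcnt : List.countP (fun c : Int => decide (c > 1))
        (List.map (fun k => (xs.count k : Int)) (PySem.Set.ofList xs))
      = List.countP (fun k => decide (2 ≤ xs.count k)) (PySem.Set.ofList xs) := by
    rw [List.countP_map]
    apply List.countP_congr
    intro k _
    simp only [Function.comp_apply, decide_eq_true_eq]
    omega
  rw [hcnt]
  ring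

-- the heart: A's phase = B's sort-then-scan, for the same gram list
lemma pv_counter_eq_runscan (xs : List (List String)) :
    (PySem.Dict.counter xs).values.foldl (fun acc c => if c > 1 then acc + 1 else acc) 0
      = pvCountRuns (xs.mergeSort pvLeGram) := by
  have hperm : (xs.mergeSort pvLeGram).Perm xs := List.mergeSort_perm xs pvLeGram
  have hpw : (xs.mergeSort pvLeGram).Pairwise (· ≤ ·) := by
    have h := List.pairwise_mergeSort (le := pvLeGram)
      (fun a b c hab hbc => by
        simp only [pvLeGram, decide_eq_true_eq] at hab hbc ⊢
        exact le_trans hab hbc)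
      (fun a b => by
        simp only [pvLeGram, Bool.or_eq_true, decide_eq_true_eq]
        exact le_total a b)
      xs
    refine h.imp ?_
    intro a b hab
    simpa [pvLeGram] using hab
  rw [pv_counter_eq_filter, pv_countRuns_sorted _ hpw]
  generalize hss : xs.mergeSort pvLeGram = ss at hperm ⊢
  congr 1
  have hstep : ((PySem.Set.ofList ss).filter (fun g => decide (2 ≤ ss.count g)))
      = ((PySem.Set.ofList ss).filter (fun g => decide (2 ≤ xs.count g))) := by
    apply List.filter_congr
    intro g _
    rw [hperm.count_eq g]
  rw [hstep]
  exact pv_filter_len_congr _ _ _ (PySem.Set.nodup_ofList xs) (PySem.Set.nodup_ofList ss)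
    (fun g => by rw [PySem.Set.mem_ofList, PySem.Set.mem_ofList, hperm.mem_iff])

-- per-n agreement of the two loop bodies' inserted values
lemma pv_per_n (text : String) (n : Int) :
    (PySem.Dict.counter (pv_get_ngrams text n false)).values.foldl
        (fun acc c => if c > 1 then acc + 1 else acc) 0
      = pvCountRuns (((PySem.List.pyRange 0 (((PySem.Str.split₀ text).length : Int) - n + 1) 1).map
            (fun i => PySem.List.slice (PySem.Str.split₀ text) (some i) (some (i + n)))).mergeSort pvLeGram) := by
  rw [pv_counter_eq_runscan (pv_get_ngrams text n false)]
  congr 2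
  unfold pv_get_ngrams
  by_cases h : ((PySem.Str.split₀ text).length : Int) < n
  · rw [if_pos h]
    have : ((PySem.Str.split₀ text).length : Int) - n + 1 ≤ 0 := by omega
    rw [PySem.List.pyRange_one,
      show ((((PySem.Str.split₀ text).length : Int) - n + 1) - 0).toNat = 0 from
        Int.toNat_eq_zero.mpr (by omega)]
    rfl
  · rw [if_neg h]
    simp only [Bool.false_and, Bool.false_eq_true, if_false]
    rw [PySem.List.foldl_append_singleton_eq_map, List.nil_append]

-- ===== VERDICT (by name: the statement is the Claim_ definition above) =====
theorem count_repeated_ngrams_spec : Claim_equal_count_repeated_ngrams := by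
  intro text n_values _
  unfold Spec_count_repeated_ngrams count_repeated_ngrams count_repeated_ngrams_alt
  congr 1
  apply PySem.List.foldl_congr_mem
  intro acc n _
  simp only [pv_per_n text n]
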